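-- pv_equiv track=rewrite | github.com/TeeKay-FourTwentyOne/math | ramsey-book-graphs/global_flatness.py | get_symmetric_pairs
-- ===== SOURCE A (Python) =====
-- def get_symmetric_pairs(p):
--     pairs = []
--     seen = set()
--     for d in range(1, p):
--         if d not in seen:
--             pairs.append((d, (-d) % p))
--             seen.add(d)
--             seen.add((-d) % p)
--     return pairs
-- ===== SOURCE B (Python) =====
-- def get_symmetric_pairs(p):
--     return [(d, (-d) % p) for d in range(1, p // 2 + 1)]
-- ===== Notes on version B (the rewrite author's own statement) =====
-- stated objective: simpler
-- what changed: B iterates only over the first half of the range and emits each pair directly, dropping A's seen-set and its membership branch entirely, since the smaller element of every pair is always reached first.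
import Mathlib
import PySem

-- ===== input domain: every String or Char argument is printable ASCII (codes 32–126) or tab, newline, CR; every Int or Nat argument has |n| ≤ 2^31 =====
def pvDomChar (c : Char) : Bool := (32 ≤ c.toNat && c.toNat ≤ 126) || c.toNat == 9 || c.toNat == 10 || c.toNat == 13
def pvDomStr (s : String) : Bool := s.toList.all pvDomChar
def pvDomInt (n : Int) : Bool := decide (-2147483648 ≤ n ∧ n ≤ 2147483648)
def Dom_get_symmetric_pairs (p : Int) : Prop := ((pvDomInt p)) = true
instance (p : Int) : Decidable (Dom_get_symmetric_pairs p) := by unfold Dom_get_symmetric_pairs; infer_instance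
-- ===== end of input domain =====

-- B drops A's dedup set and membership branch: the smaller element of each pair comes first,
-- so the output is exactly (d, (-d) % p) for d in range(1, p//2 + 1).  Objective: simpler.

-- ===== PORT A =====
-- A-side helper: the loop body (append the pair and mark both elements seen, unless d was seen)
def pvStepA (p : Int) (st : List (Int × Int) × PySem.Set Int) (d : Int) :
    List (Int × Int) × PySem.Set Int :=
  if !(PySem.Set.contains st.2 d) then
    (st.1 ++ [(d, PySem.Int.mod (-d) p)],
     PySem.Set.add (PySem.Set.add st.2 d) (PySem.Int.mod (-d) p))
  else st

def get_symmetric_pairs (p : Int) : List (Int × Int) :=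
  ((PySem.List.pyRange 1 p 1).foldl (pvStepA p) ([], PySem.Set.empty)).1

-- ===== PORT B =====
def get_symmetric_pairs_alt (p : Int) : List (Int × Int) :=
  (PySem.List.pyRange 1 (PySem.Int.floordiv p 2 + 1) 1).map
    (fun d => (d, PySem.Int.mod (-d) p))

-- ===== PRECONDITION & SPEC =====
def Spec_get_symmetric_pairs (p : Int) (out : List (Int × Int)) : Prop := out = get_symmetric_pairs_alt p
instance (p : Int) (out : List (Int × Int)) : Decidable (Spec_get_symmetric_pairs p out) := by unfold Spec_get_symmetric_pairs; infer_instance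

-- ===== CLAIM (what is proved, stated in full; the proofs are below) =====
def Claim_equal_get_symmetric_pairs : Prop := ∀ (p : Int), Dom_get_symmetric_pairs p → Spec_get_symmetric_pairs p (get_symmetric_pairs p)

-- ===== LEMMAS AND PROOFS =====

-- Python (-d) % p for 1 ≤ d ≤ p-1 is p - d.
lemma pvModNeg (p d : Int) (h1 : 1 ≤ d) (h2 : d ≤ p - 1) : PySem.Int.mod (-d) p = p - d := by
  rw [PySem.Int.mod_eq_emod_of_pos (by omega)]
  have h : (-d : Int) % p = (p - d) % p := by
    conv_rhs => rw [show p - d = -d + p * 1 by ring]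
    rw [Int.add_mul_emod_self_left]
  rw [h, Int.emod_eq_of_lt (by omega) (by omega)]

-- Loop invariant for A's fold: with the seen-set describing exactly the processed prefix
-- {1..k-1} ∪ {p-k+1..p-1}, the remaining fold appends the pairs for d = k..p//2.
lemma pvLoopA (p : Int) (hp : 2 ≤ p) :
    ∀ (n : Nat) (k : Int), k = p - n → 1 ≤ k →
      ∀ (acc : List (Int × Int)) (s : PySem.Set Int),
      (∀ x : Int, x ∈ s ↔ (1 ≤ x ∧ x < k) ∨ (p - k < x ∧ x ≤ p - 1)) →
      ((PySem.List.pyRange k p 1).foldl (pvStepA p) (acc, s)).1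
        = acc ++ (PySem.List.pyRange k (PySem.Int.floordiv p 2 + 1) 1).map (fun d => (d, p - d)) := by
  intro n
  induction n with
  | zero =>
      intro k hk _ acc s _
      have h1 : PySem.List.pyRange k p 1 = [] := PySem.List.pyRange_one_eq_nil (by omega)
      have h2 : PySem.List.pyRange k (PySem.Int.floordiv p 2 + 1) 1 = [] := by
        apply PySem.List.pyRange_one_eq_nil
        have := (PySem.Int.floordiv_lt_iff_lt_mul (a := p) (b := 2) (q := p) (by omega)).mpr (by omega)
        omega
      rw [h1, h2]
      simp
  | succ m ih =>
      intro k hk hk1 acc s hs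
      by_cases hkp : k < p
      · rw [PySem.List.pyRange_one_cons hkp]
        simp only [List.foldl_cons]
        have hhalf := PySem.Int.floordiv_lt_iff_lt_mul (a := p) (b := 2) (q := k) (by omega)
        by_cases hmem : (1 ≤ k ∧ k < k) ∨ (p - k < k ∧ k ≤ p - 1)
        · -- k already seen: k > p//2
          have hks : k ∈ s := (hs k).mpr hmem
          have hstep : pvStepA p (acc, s) k = (acc, s) := by simp [pvStepA, hks]
          rw [hstep]
          have hgt : PySem.Int.floordiv p 2 < k := hhalf.mpr (by omega)
          have h2 : PySem.List.pyRange k (PySem.Int.floordiv p 2 + 1) 1 = [] :=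
            PySem.List.pyRange_one_eq_nil (by omega)
          have h2' : PySem.List.pyRange (k+1) (PySem.Int.floordiv p 2 + 1) 1 = [] :=
            PySem.List.pyRange_one_eq_nil (by omega)
          have hrec := ih (k + 1) (by omega) (by omega) acc s (by
            intro x; rw [hs x]; constructor <;> intro h <;> omega)
          rw [hrec, h2, h2']
        · -- k not seen: k ≤ p//2, emit the pair and extend the seen set
          have hkns : k ∉ s := fun h => hmem ((hs k).mp h)
          have hle : k ≤ PySem.Int.floordiv p 2 := by
            by_contra hgt
            rw [not_le] at hgt
            have := hhalf.mp hgt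
            exact hmem (Or.inr ⟨by omega, by omega⟩)
          have hmodk : PySem.Int.mod (-k) p = p - k := pvModNeg p k hk1 (by omega)
          have hstep : pvStepA p (acc, s) k
              = (acc ++ [(k, p - k)], PySem.Set.add (PySem.Set.add s k) (p - k)) := by
            simp [pvStepA, hkns, hmodk]
          rw [hstep]
          have hinv : ∀ x : Int,
              x ∈ PySem.Set.add (PySem.Set.add s k) (p - k) ↔
                (1 ≤ x ∧ x < k + 1) ∨ (p - (k + 1) < x ∧ x ≤ p - 1) := by
            intro x
            rw [PySem.Set.mem_add, PySem.Set.mem_add, hs x]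
            constructor <;> intro h <;> omega
          have hrec := ih (k + 1) (by omega) (by omega) (acc ++ [(k, p - k)]) _ hinv
          rw [hrec]
          have hcons : PySem.List.pyRange k (PySem.Int.floordiv p 2 + 1) 1
              = k :: PySem.List.pyRange (k+1) (PySem.Int.floordiv p 2 + 1) 1 :=
            PySem.List.pyRange_one_cons (by omega)
          rw [hcons]
          simp
      · have h1 : PySem.List.pyRange k p 1 = [] := PySem.List.pyRange_one_eq_nil (by omega)
        have h2 : PySem.List.pyRange k (PySem.Int.floordiv p 2 + 1) 1 = [] := by
          apply PySem.List.pyRange_one_eq_nil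
          have := (PySem.Int.floordiv_lt_iff_lt_mul (a := p) (b := 2) (q := p) (by omega)).mpr (by omega)
          omega
        rw [h1, h2]
        simp

-- ===== VERDICT (by name: the statement is the Claim_ definition above) =====
theorem get_symmetric_pairs_spec : Claim_equal_get_symmetric_pairs := by
  intro p _
  unfold Spec_get_symmetric_pairs get_symmetric_pairs get_symmetric_pairs_alt
  by_cases hp : 2 ≤ p
  · have h := pvLoopA p hp (p - 1).toNat 1 (by omega) (by omega) [] PySem.Set.empty
      (by intro x
          constructor
          · intro h; simp [PySem.Set.empty] at h
          · intro h; exact absurd h (by omega))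
    rw [h, List.nil_append]
    apply List.map_congr_left
    intro d hd
    rw [PySem.List.mem_pyRange_one] at hd
    have hd2 : d ≤ p - 1 := by
      have := (PySem.Int.floordiv_lt_iff_lt_mul (a := p) (b := 2) (q := p) (by omega)).mpr (by omega)
      omega
    rw [pvModNeg p d hd.1 hd2]
  · have h1 : PySem.List.pyRange 1 p 1 = [] := PySem.List.pyRange_one_eq_nil (by omega)
    have h2 : PySem.List.pyRange 1 (PySem.Int.floordiv p 2 + 1) 1 = [] := by
      apply PySem.List.pyRange_one_eq_nil
      rcases lt_or_ge p 0 with h | h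
      · have := (PySem.Int.floordiv_lt_iff_lt_mul (a := p) (b := 2) (q := 0) (by omega)).mpr (by omega)
        omega
      · interval_cases p <;> decide
    rw [h1, h2]
    simp
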